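-- pv_equiv track=rewrite | github.com/foss42/poc-experiments | 2026/rithara-api-explorer/backend-pipeline/pipeline/enricher.py | _detect_auth
-- ===== SOURCE A (Python) =====
-- from typing import List, Dict, Any, Optional
--
-- def _detect_auth(security_schemes: Dict[str, Any], api_id: str) -> tuple[str, List[str]]:
--     """
--     Detects auth type and placeholders based on security scheme definitions.
--     """
--     # Prefix for environment variables
--     provider_name = api_id.split(':')[0].split('.')[0].upper()
--
--     # Priority check
--     schemes = security_schemes or {}
--
--     # 1. Bearer Token
--     for s in schemes.values():
--         if s.get("type") == "http" and s.get("scheme") == "bearer":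
--             return "bearer_token", [f"{{{{{provider_name}_API_KEY}}}}"]
--         if s.get("type") == "apiKey" and s.get("name", "").lower() == "authorization":
--             return "bearer_token", [f"{{{{{provider_name}_API_KEY}}}}"]
--
--     # 2. API Key
--     for s in schemes.values():
--         if s.get("type") == "apiKey" and s.get("in") in ["header", "query"]:
--             return "api_key", [f"{{{{{provider_name}_API_KEY}}}}"]
--
--     # 3. OAuth2
--     for s in schemes.values():
--         if s.get("type") == "oauth2":
--             return "oauth2", [f"{{{{{provider_name}_ACCESS_TOKEN}}}}"]
--
--     # 4. Basic Auth
--     for s in schemes.values():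
--         if s.get("type") == "http" and s.get("scheme") == "basic":
--             return "basic", [f"{{{{{provider_name}_USERNAME}}}}", f"{{{{{provider_name}_PASSWORD}}}}"]
--
--     return "none", []
-- ===== SOURCE B (Python) =====
-- def _tier(s):
--     t = s.get("type")
--     if (t == "http" and s.get("scheme") == "bearer") or \
--        (t == "apiKey" and s.get("name", "").lower() == "authorization"):
--         return 1
--     if t == "apiKey" and s.get("in") in ("header", "query"):
--         return 2
--     if t == "oauth2":
--         return 3
--     if t == "http" and s.get("scheme") == "basic":
--         return 4
--     return 5
--
--
-- def _payload(tier, provider_name):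
--     if tier == 1:
--         return "bearer_token", [f"{{{{{provider_name}_API_KEY}}}}"]
--     if tier == 2:
--         return "api_key", [f"{{{{{provider_name}_API_KEY}}}}"]
--     if tier == 3:
--         return "oauth2", [f"{{{{{provider_name}_ACCESS_TOKEN}}}}"]
--     if tier == 4:
--         return "basic", [f"{{{{{provider_name}_USERNAME}}}}", f"{{{{{provider_name}_PASSWORD}}}}"]
--     return "none", []
--
--
-- def _detect_auth(security_schemes, api_id):
--     provider_name = api_id.split(':')[0].split('.')[0].upper()
--     best = 5
--     for s in (security_schemes or {}).values():
--         t = _tier(s)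
--         if t < best:
--             best = t
--     return _payload(best, provider_name)
-- ===== Notes on version B (the rewrite author's own statement) =====
-- stated objective: alternative
-- what changed: Replaced A's four sequential full scans over the schemes (one per auth tier) by a single pass that computes each scheme's lowest matching priority tier, keeps the running minimum, and maps the final tier to its payload.
import Mathlib
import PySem

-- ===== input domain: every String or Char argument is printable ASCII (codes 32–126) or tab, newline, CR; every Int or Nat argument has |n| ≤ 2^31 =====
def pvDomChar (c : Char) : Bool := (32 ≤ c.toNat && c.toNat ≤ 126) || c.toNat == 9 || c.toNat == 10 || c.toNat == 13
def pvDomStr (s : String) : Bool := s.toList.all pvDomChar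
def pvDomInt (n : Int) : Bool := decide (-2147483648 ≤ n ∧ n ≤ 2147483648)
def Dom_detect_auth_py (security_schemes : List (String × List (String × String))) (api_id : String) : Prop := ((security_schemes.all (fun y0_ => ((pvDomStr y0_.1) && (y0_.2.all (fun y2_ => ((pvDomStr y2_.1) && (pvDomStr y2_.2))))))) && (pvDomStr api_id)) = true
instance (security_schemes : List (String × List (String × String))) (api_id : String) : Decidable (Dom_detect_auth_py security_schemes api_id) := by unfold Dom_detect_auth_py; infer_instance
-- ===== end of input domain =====

-- B replaces A's four sequential scans over the schemes by one scan that keeps the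
-- minimum matching priority tier and builds the payload from that tier (objective: simpler/alternative).

-- shared by both ports: provider_name = api_id.split(':')[0].split('.')[0].upper()
-- (split with a nonempty separator never returns an empty list, so [0] = headD "" is exact)
def pvProvider (api_id : String) : String :=
  PySem.Str.upper ((((PySem.Str.split? (((PySem.Str.split? api_id ":").getD []).headD "") ".").getD []).headD ""))

-- ===== PORT A =====
-- s.get(k) on the inner dict (association list, first match)
def aGet (s : List (String × String)) (k : String) : Option String :=
  (PySem.Dict.mk s).get? k

def aCond1 (s : List (String × String)) : Bool :=
  (aGet s "type" == some "http" && aGet s "scheme" == some "bearer")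
    || (aGet s "type" == some "apiKey"
        && PySem.Str.lower ((aGet s "name").getD "") == "authorization")

def aCond2 (s : List (String × String)) : Bool :=
  aGet s "type" == some "apiKey"
    && (aGet s "in" == some "header" || aGet s "in" == some "query")

def aCond3 (s : List (String × String)) : Bool :=
  aGet s "type" == some "oauth2"

def aCond4 (s : List (String × String)) : Bool :=
  aGet s "type" == some "http" && aGet s "scheme" == some "basic"

def detect_auth_py (security_schemes : List (String × List (String × String))) (api_id : String) : String × List String :=
  let provider := pvProvider api_id
  let vals := security_schemes.map (·.2)     -- schemes.values(); 'or {}' is the identity here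
  if vals.any aCond1 then ("bearer_token", ["{{" ++ provider ++ "_API_KEY}}"])
  else if vals.any aCond2 then ("api_key", ["{{" ++ provider ++ "_API_KEY}}"])
  else if vals.any aCond3 then ("oauth2", ["{{" ++ provider ++ "_ACCESS_TOKEN}}"])
  else if vals.any aCond4 then ("basic", ["{{" ++ provider ++ "_USERNAME}}", "{{" ++ provider ++ "_PASSWORD}}"])
  else ("none", [])

-- ===== PORT B =====
def bGet (s : List (String × String)) (k : String) : Option String :=
  (PySem.Dict.mk s).get? k

def bTier (s : List (String × String)) : Nat :=
  let g := bGet s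
  if (g "type" == some "http" && g "scheme" == some "bearer")
      || (g "type" == some "apiKey"
          && PySem.Str.lower ((g "name").getD "") == "authorization") then 1
  else if g "type" == some "apiKey" && (g "in" == some "header" || g "in" == some "query") then 2
  else if g "type" == some "oauth2" then 3
  else if g "type" == some "http" && g "scheme" == some "basic" then 4
  else 5

def bPayload (tier : Nat) (provider : String) : String × List String :=
  if tier = 1 then ("bearer_token", ["{{" ++ provider ++ "_API_KEY}}"])
  else if tier = 2 then ("api_key", ["{{" ++ provider ++ "_API_KEY}}"])
  else if tier = 3 then ("oauth2", ["{{" ++ provider ++ "_ACCESS_TOKEN}}"])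
  else if tier = 4 then ("basic", ["{{" ++ provider ++ "_USERNAME}}", "{{" ++ provider ++ "_PASSWORD}}"])
  else ("none", [])

def detect_auth_py_alt (security_schemes : List (String × List (String × String))) (api_id : String) : String × List String :=
  let best := (security_schemes.map (·.2)).foldl
      (fun b s => if bTier s < b then bTier s else b) 5
  bPayload best (pvProvider api_id)

-- ===== PRECONDITION & SPEC =====
def Spec_detect_auth_py (security_schemes : List (String × List (String × String))) (api_id : String) (out : String × List String) : Prop := out = detect_auth_py_alt security_schemes api_id
instance (security_schemes : List (String × List (String × String))) (api_id : String) (out : String × List String) : Decidable (Spec_detect_auth_py security_schemes api_id out) := by unfold Spec_detect_auth_py; infer_instance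

-- ===== CLAIM (what is proved, stated in full; the proofs are below) =====
def Claim_equal_detect_auth_py : Prop := ∀ (security_schemes : List (String × List (String × String))) (api_id : String), Dom_detect_auth_py security_schemes api_id → Spec_detect_auth_py security_schemes api_id (detect_auth_py security_schemes api_id)

-- ===== LEMMAS AND PROOFS =====

def pvFold (vals : List (List (String × String))) (b : Nat) : Nat :=
  vals.foldl (fun b s => if bTier s < b then bTier s else b) b

theorem bTier_le5 (s : List (String × String)) : bTier s ≤ 5 := by
  simp only [bTier]; split_ifs <;> omega

theorem bTier_ge1 (s : List (String × String)) : 1 ≤ bTier s := by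
  simp only [bTier]; split_ifs <;> omega

theorem pvFold_cons (s : List (String × String)) (r : List (List (String × String))) (b : Nat) :
    pvFold (s :: r) b = pvFold r (min (bTier s) b) := by
  have h : (if bTier s < b then bTier s else b) = min (bTier s) b := by
    rw [Nat.min_def]; split_ifs <;> omega
  simp only [pvFold, List.foldl_cons, h]

theorem pvFold_shift (vals : List (List (String × String))) (b : Nat) (hb : b ≤ 5) :
    pvFold vals b = min b (pvFold vals 5) := by
  induction vals generalizing b with
  | nil => simp [pvFold]; omega
  | cons s r ih =>
    rw [pvFold_cons, pvFold_cons, ih (min (bTier s) b) (by have := bTier_le5 s; omega),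
        ih (min (bTier s) 5) (by have := bTier_le5 s; omega)]
    have := bTier_le5 s
    omega

theorem pvFold_le_iff (i : Nat) (hi : i < 5) (vals : List (List (String × String))) :
    pvFold vals 5 ≤ i ↔ vals.any (fun s => bTier s ≤ i) = true := by
  induction vals with
  | nil => simp [pvFold]; omega
  | cons s r ih =>
    rw [pvFold_cons, pvFold_shift r _ (by have := bTier_le5 s; omega)]
    simp only [List.any_cons, Bool.or_eq_true, decide_eq_true_eq, ← ih]
    omega

theorem pvFold_ge1 (vals : List (List (String × String))) : 1 ≤ pvFold vals 5 := by
  by_contra h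
  have h0 : pvFold vals 5 ≤ 0 := by omega
  rw [pvFold_le_iff 0 (by omega)] at h0
  simp only [List.any_eq_true, decide_eq_true_eq] at h0
  obtain ⟨s, _, hs⟩ := h0
  have := bTier_ge1 s
  omega

theorem pvFold_le5 (vals : List (List (String × String))) : pvFold vals 5 ≤ 5 := by
  have := pvFold_shift vals 5 (le_refl 5)
  omega

-- pointwise bridges between A's conditions and B's tier
theorem tier_le1_iff (s : List (String × String)) : bTier s ≤ 1 ↔ aCond1 s = true := by
  simp only [bTier, bGet, aCond1, aGet]
  split_ifs with h <;> simp_all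

theorem tier_le2_iff (s : List (String × String)) :
    bTier s ≤ 2 ↔ (aCond1 s || aCond2 s) = true := by
  simp only [bTier, bGet, aCond1, aCond2, aGet]
  split_ifs with h1 h2 <;> simp_all

theorem tier_le3_iff (s : List (String × String)) :
    bTier s ≤ 3 ↔ (aCond1 s || aCond2 s || aCond3 s) = true := by
  simp only [bTier, bGet, aCond1, aCond2, aCond3, aGet]
  split_ifs with h1 h2 h3 <;> simp_all

theorem tier_le4_iff (s : List (String × String)) :
    bTier s ≤ 4 ↔ (aCond1 s || aCond2 s || aCond3 s || aCond4 s) = true := by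
  simp only [bTier, bGet, aCond1, aCond2, aCond3, aCond4, aGet]
  split_ifs with h1 h2 h3 h4 <;> simp_all

theorem any_or_split (vals : List (List (String × String))) (p q : List (String × String) → Bool) :
    vals.any (fun s => p s || q s) = (vals.any p || vals.any q) := by
  induction vals with
  | nil => rfl
  | cons s r ih => simp [List.any_cons, ih, Bool.or_assoc, Bool.or_left_comm]

-- ===== VERDICT (by name: the statement is the Claim_ definition above) =====
theorem detect_auth_py_spec : Claim_equal_detect_auth_py := by
  intro ss api _
  show detect_auth_py ss api = detect_auth_py_alt ss api
  unfold detect_auth_py detect_auth_py_alt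
  set vals := ss.map (·.2) with hv
  set M := pvFold vals 5 with hM
  have hfold : vals.foldl (fun b s => if bTier s < b then bTier s else b) 5 = M := rfl
  rw [hfold]
  have h1 : vals.any aCond1 = true ↔ M ≤ 1 := by
    rw [pvFold_le_iff 1 (by omega)]
    simp only [List.any_eq_true, decide_eq_true_eq]
    constructor
    · rintro ⟨s, hs, hp⟩; exact ⟨s, hs, (tier_le1_iff s).2 hp⟩
    · rintro ⟨s, hs, hp⟩; exact ⟨s, hs, (tier_le1_iff s).1 hp⟩
  have h2 : (vals.any aCond1 || vals.any aCond2) = true ↔ M ≤ 2 := by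
    rw [← any_or_split, pvFold_le_iff 2 (by omega)]
    simp only [List.any_eq_true, decide_eq_true_eq]
    constructor
    · rintro ⟨s, hs, hp⟩; exact ⟨s, hs, (tier_le2_iff s).2 hp⟩
    · rintro ⟨s, hs, hp⟩; exact ⟨s, hs, (tier_le2_iff s).1 hp⟩
  have h3 : (vals.any aCond1 || vals.any aCond2 || vals.any aCond3) = true ↔ M ≤ 3 := by
    rw [← any_or_split, ← any_or_split, pvFold_le_iff 3 (by omega)]
    simp only [List.any_eq_true, decide_eq_true_eq]
    constructor
    · rintro ⟨s, hs, hp⟩; exact ⟨s, hs, (tier_le3_iff s).2 hp⟩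
    · rintro ⟨s, hs, hp⟩; exact ⟨s, hs, (tier_le3_iff s).1 hp⟩
  have h4 : (vals.any aCond1 || vals.any aCond2 || vals.any aCond3 || vals.any aCond4) = true ↔ M ≤ 4 := by
    rw [← any_or_split, ← any_or_split, ← any_or_split, pvFold_le_iff 4 (by omega)]
    simp only [List.any_eq_true, decide_eq_true_eq]
    constructor
    · rintro ⟨s, hs, hp⟩; exact ⟨s, hs, (tier_le4_iff s).2 hp⟩
    · rintro ⟨s, hs, hp⟩; exact ⟨s, hs, (tier_le4_iff s).1 hp⟩
  have hge := pvFold_ge1 vals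
  have hle := pvFold_le5 vals
  by_cases c1 : vals.any aCond1 = true
  · have : M = 1 := by have := h1.1 c1; omega
    simp [c1, this, bPayload]
  · by_cases c2 : vals.any aCond2 = true
    · have : M = 2 := by
        have hle2 := h2.1 (by simp [c2])
        have : ¬ M ≤ 1 := fun h => c1 (h1.2 h)
        omega
      simp [c1, c2, this, bPayload]
    · by_cases c3 : vals.any aCond3 = true
      · have : M = 3 := by
          have hle3 := h3.1 (by simp [c3])
          have : ¬ M ≤ 2 := fun h => by
            have := h2.2 h; simp only [Bool.or_eq_true] at this; tauto
          omega
        simp [c1, c2, c3, this, bPayload]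
      · by_cases c4 : vals.any aCond4 = true
        · have : M = 4 := by
            have hle4 := h4.1 (by simp [c4])
            have : ¬ M ≤ 3 := fun h => by
              have := h3.2 h; simp only [Bool.or_eq_true] at this; tauto
            omega
          simp [c1, c2, c3, c4, this, bPayload]
        · have : M = 5 := by
            have : ¬ M ≤ 4 := fun h => by
              have := h4.2 h; simp only [Bool.or_eq_true] at this; tauto
            omega
          simp [c1, c2, c3, c4, this, bPayload]
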